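-- pv_equiv track=rewrite | github.com/H-B-P/DURKON | impose.py | firmly_monotonize_this_list
-- ===== SOURCE A (Python) =====
-- def firmly_monotonize_this_list(l, increasing=True):
--  newL = l.copy()
--  if increasing:
--   for i in range(len(newL)-1):
--    if newL[i+1]<newL[i]:
--     newL[i+1]=newL[i]
--  else:
--   for i in range(len(newL)-1):
--    if newL[i+1]>newL[i]:
--     newL[i+1]=newL[i]
--  return newL
-- ===== SOURCE B (Python) =====
-- def firmly_monotonize_this_list(l, increasing=True):
--     # Divide and conquer: monotonize each half independently, then clamp the
--     # right half by the last value of the monotonized left half.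
--     def solve(seg):
--         if len(seg) <= 1:
--             return list(seg)
--         mid = len(seg) // 2
--         left = solve(seg[:mid])
--         right = solve(seg[mid:])
--         b = left[-1]
--         if increasing:
--             return left + [b if r < b else r for r in right]
--         else:
--             return left + [b if r > b else r for r in right]
--     return solve(l)
-- ===== Notes on version B (the rewrite author's own statement) =====
-- stated objective: alternative
-- what changed: Replaces A's single left-to-right copy-then-mutate-by-index pass with a divide-and-conquer algorithm: monotonize each half recursively, then clamp the right half by the last value of the monotonized left half.
import Mathlib
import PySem

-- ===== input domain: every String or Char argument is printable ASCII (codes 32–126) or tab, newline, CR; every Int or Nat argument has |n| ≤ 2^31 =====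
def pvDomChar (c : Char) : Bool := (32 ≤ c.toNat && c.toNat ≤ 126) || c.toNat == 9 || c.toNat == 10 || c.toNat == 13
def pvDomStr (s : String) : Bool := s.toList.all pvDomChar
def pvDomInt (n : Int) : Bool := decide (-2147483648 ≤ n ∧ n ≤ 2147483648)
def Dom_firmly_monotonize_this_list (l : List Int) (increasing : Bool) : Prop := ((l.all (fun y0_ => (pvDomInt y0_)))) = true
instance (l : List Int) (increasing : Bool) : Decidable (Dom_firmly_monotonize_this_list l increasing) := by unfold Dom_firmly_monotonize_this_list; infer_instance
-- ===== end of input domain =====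

-- B replaces A's single copy-then-mutate-by-index pass with a divide-and-conquer
-- recursion (monotonize halves, clamp the right half by the left half's last value).

-- ===== PORT A =====
-- one step of A's for-loop body at index i (newL[i+1] and newL[i] are always in range, since i ∈ range(len-1))
def fmStepA (increasing : Bool) (nl : List Int) (i : Nat) : List Int :=
  if increasing then
    (if nl.getD (i+1) 0 < nl.getD i 0 then nl.set (i+1) (nl.getD i 0) else nl)
  else
    (if nl.getD i 0 < nl.getD (i+1) 0 then nl.set (i+1) (nl.getD i 0) else nl)

def firmly_monotonize_this_list (l : List Int) (increasing : Bool) : List Int :=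
  -- newL = l.copy(); for i in range(len(newL)-1): ... ; return newL
  (List.range (l.length - 1)).foldl (fmStepA increasing) l

-- ===== PORT B =====
-- Source B's inner `solve`: split at mid, recurse on both halves, clamp the right
-- half by b = left[-1] (left is nonempty here, so the getD default is never used)
def fmSolve (increasing : Bool) (seg : List Int) : List Int :=
  if _h : seg.length ≤ 1 then seg
  else
    let mid := seg.length / 2
    let left := fmSolve increasing (seg.take mid)
    let right := fmSolve increasing (seg.drop mid)
    let b := left.getD (left.length - 1) 0
    if increasing then left ++ right.map (fun r => if r < b then b else r)
    else left ++ right.map (fun r => if b < r then b else r)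
termination_by seg.length
decreasing_by
  · simp [List.length_take]; omega
  · simp [List.length_drop]; omega

def firmly_monotonize_this_list_alt (l : List Int) (increasing : Bool) : List Int :=
  fmSolve increasing l

-- ===== PRECONDITION & SPEC =====
def Spec_firmly_monotonize_this_list (l : List Int) (increasing : Bool) (out : List Int) : Prop := out = firmly_monotonize_this_list_alt l increasing
instance (l : List Int) (increasing : Bool) (out : List Int) : Decidable (Spec_firmly_monotonize_this_list l increasing out) := by unfold Spec_firmly_monotonize_this_list; infer_instance

-- ===== CLAIM (what is proved, stated in full; the proofs are below) =====
def Claim_equal_firmly_monotonize_this_list : Prop := ∀ (l : List Int) (increasing : Bool), Dom_firmly_monotonize_this_list l increasing → Spec_firmly_monotonize_this_list l increasing (firmly_monotonize_this_list l increasing)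

-- ===== LEMMAS AND PROOFS =====

-- common specification both ports are reduced to: a running-bound scan
def fmOp (inc : Bool) (a x : Int) : Int := if inc then max a x else min a x

def fmScan (inc : Bool) (c : Int) : List Int → List Int
  | [] => []
  | x :: xs => fmOp inc c x :: fmScan inc (fmOp inc c x) xs

def fmSpec (inc : Bool) : List Int → List Int
  | [] => []
  | x :: xs => x :: fmScan inc x xs

theorem fmOp_assoc (inc : Bool) (a b c : Int) : fmOp inc (fmOp inc a b) c = fmOp inc a (fmOp inc b c) := by
  cases inc <;> simp [fmOp]

theorem fmScan_length (inc : Bool) : ∀ (xs : List Int) (c : Int), (fmScan inc c xs).length = xs.length := by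
  intro xs; induction xs with
  | nil => intro c; rfl
  | cons x xs ih => intro c; simp [fmScan, ih]

theorem fmScan_append (inc : Bool) : ∀ (xs : List Int) (c : Int) (ys : List Int),
    fmScan inc c (xs ++ ys) = fmScan inc c xs ++ fmScan inc (xs.foldl (fmOp inc) c) ys := by
  intro xs; induction xs with
  | nil => intro c ys; rfl
  | cons x xs ih => intro c ys; simp [fmScan, ih, List.foldl_cons]

theorem fmScan_map (inc : Bool) : ∀ (xs : List Int) (b c : Int),
    (fmScan inc c xs).map (fmOp inc b) = fmScan inc (fmOp inc b c) xs := by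
  intro xs; induction xs with
  | nil => intro b c; rfl
  | cons x xs ih => intro b c; simp [fmScan, ih, fmOp_assoc]

theorem fmScan_last (inc : Bool) : ∀ (xs : List Int) (c : Int),
    (c :: fmScan inc c xs).getD xs.length 0 = xs.foldl (fmOp inc) c := by
  intro xs; induction xs with
  | nil => intro c; rfl
  | cons x xs ih => intro c; simpa [fmScan, List.foldl_cons] using ih (fmOp inc c x)

-- splitting lemma for the spec: monotonize halves, clamp the right half
theorem fmSpec_append (inc : Bool) (x : Int) (xs : List Int) (r : Int) (rs : List Int) :
    fmSpec inc ((x :: xs) ++ (r :: rs))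
      = fmSpec inc (x :: xs)
        ++ (fmSpec inc (r :: rs)).map
             (fmOp inc ((fmSpec inc (x :: xs)).getD ((fmSpec inc (x :: xs)).length - 1) 0)) := by
  have hb : (fmSpec inc (x :: xs)).getD ((fmSpec inc (x :: xs)).length - 1) 0
      = xs.foldl (fmOp inc) x := by
    rw [show fmSpec inc (x :: xs) = x :: fmScan inc x xs from rfl,
      show (x :: fmScan inc x xs).length - 1 = xs.length by simp [fmScan_length]]
    exact fmScan_last inc xs x
  rw [hb]
  simp [fmSpec, fmScan_append, fmScan, fmScan_map]

theorem fmSolve_eq_spec (inc : Bool) : ∀ (n : Nat) (seg : List Int), seg.length ≤ n →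
    fmSolve inc seg = fmSpec inc seg := by
  intro n
  induction n with
  | zero =>
    intro seg h
    have : seg = [] := List.length_eq_zero_iff.mp (Nat.le_zero.mp h)
    subst this; rw [fmSolve]; simp [fmSpec]
  | succ n ih =>
    intro seg h
    rw [fmSolve]
    by_cases h1 : seg.length ≤ 1
    · simp only [h1, dif_pos]
      match seg, h1 with
      | [], _ => rfl
      | [x], _ => simp [fmSpec, fmScan]
    · simp only [h1, dif_neg, not_false_iff]
      have hlen : 2 ≤ seg.length := by omega
      have hmid1 : 1 ≤ seg.length / 2 := by omega
      have hmidlt : seg.length / 2 < seg.length := by omega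
      have htake : (seg.take (seg.length / 2)).length ≤ n := by
        simp only [List.length_take]; omega
      have hdrop : (seg.drop (seg.length / 2)).length ≤ n := by
        simp only [List.length_drop]; omega
      rw [ih _ htake, ih _ hdrop]
      -- both halves are nonempty
      obtain ⟨x, xs, hL⟩ : ∃ x xs, seg.take (seg.length / 2) = x :: xs := by
        cases hT : seg.take (seg.length / 2) with
        | nil => exfalso; have hlt := congrArg List.length hT; rw [List.length_take, List.length_nil] at hlt; omega
        | cons a as => exact ⟨a, as, rfl⟩
      obtain ⟨r, rs, hR⟩ : ∃ r rs, seg.drop (seg.length / 2) = r :: rs := by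
        cases hT : seg.drop (seg.length / 2) with
        | nil => exfalso; have hlt := congrArg List.length hT; rw [List.length_drop, List.length_nil] at hlt; omega
        | cons a as => exact ⟨a, as, rfl⟩
      have hsplit : seg = (x :: xs) ++ (r :: rs) := by
        rw [← hL, ← hR]; simp
      rw [hL, hR]
      conv_rhs => rw [hsplit]
      rw [fmSpec_append]
      rcases inc with _ | _
      · simp only [Bool.false_eq_true, if_false]
        congr 1
        exact List.map_congr_left (fun q _ => by simp [fmOp]; omega)
      · simp only [if_true]
        congr 1
        exact List.map_congr_left (fun q _ => by simp [fmOp]; omega)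

-- ==== A's side: reduce the index-mutation loop to the same scan ====
theorem fmStepA_cons (inc : Bool) (x : Int) (m : List Int) (i : Nat) :
    fmStepA inc (x :: m) (i+1) = x :: fmStepA inc m i := by
  unfold fmStepA
  cases inc <;> simp <;> split <;> rfl

theorem foldl_fmStepA_shift (inc : Bool) (x : Int) :
    ∀ (is : List Nat) (m : List Int),
      is.foldl (fun s i => fmStepA inc s (i+1)) (x :: m) = x :: is.foldl (fmStepA inc) m := by
  intro is
  induction is with
  | nil => intro m; rfl
  | cons j js ih => intro m; simp [List.foldl_cons, fmStepA_cons, ih]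

theorem fmStepA_zero (inc : Bool) (x y : Int) (t : List Int) :
    fmStepA inc (x :: y :: t) 0 = x :: fmOp inc x y :: t := by
  unfold fmStepA fmOp
  cases inc <;> simp <;> split_ifs <;> simp [max_def, min_def] <;> omega

theorem portA_step (inc : Bool) (x y : Int) (t : List Int) :
    firmly_monotonize_this_list (x :: y :: t) inc
      = x :: firmly_monotonize_this_list (fmOp inc x y :: t) inc := by
  unfold firmly_monotonize_this_list
  have hlen : (x :: y :: t).length - 1 = t.length + 1 := by simp
  rw [hlen, List.range_succ_eq_map, List.foldl_cons, fmStepA_zero, List.foldl_map,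
    foldl_fmStepA_shift]
  simp

theorem portA_eq_spec : ∀ (t : List Int) (x y : Int) (inc : Bool),
    firmly_monotonize_this_list (x :: y :: t) inc = fmSpec inc (x :: y :: t) := by
  intro t
  induction t with
  | nil =>
    intro x y inc
    rw [portA_step]
    simp [firmly_monotonize_this_list, fmSpec, fmScan]
  | cons z t' ih =>
    intro x y inc
    rw [portA_step, ih]
    simp [fmSpec, fmScan]

-- ===== VERDICT (by name: the statement is the Claim_ definition above) =====
theorem firmly_monotonize_this_list_spec : Claim_equal_firmly_monotonize_this_list := by
  intro l inc _
  unfold Spec_firmly_monotonize_this_list firmly_monotonize_this_list_alt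
  rw [fmSolve_eq_spec inc l.length l le_rfl]
  match l with
  | [] => rfl
  | [x] => rfl
  | x :: y :: t => exact portA_eq_spec t x y inc
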